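-- pv_equiv track=rewrite | github.com/aiperceivable/apdev | python/src/apdev/check_chars.py | _compute_comment_mask_js
-- ===== SOURCE A (Python) =====
-- def _compute_comment_mask_js(content: str) -> set[int]:
--     mask: set[int] = set()
--     i = 0
--     n = len(content)
--
--     while i < n:
--         # Template literal
--         if content[i] == "`":
--             i += 1
--             while i < n:
--                 if content[i] == "\\" and i + 1 < n:
--                     i += 2
--                     continue
--                 if content[i] == "`":
--                     i += 1
--                     break
--                 i += 1
--             continue
--
--         # Single / double quoted strings
--         if content[i] in ('"', "'"):
--             quote_char = content[i]
--             i += 1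
--             while i < n and content[i] != "\n":
--                 if content[i] == "\\" and i + 1 < n:
--                     i += 2
--                     continue
--                 if content[i] == quote_char:
--                     i += 1
--                     break
--                 i += 1
--             continue
--
--         # Line comment
--         if i + 1 < n and content[i : i + 2] == "//":
--             while i < n and content[i] != "\n":
--                 mask.add(i)
--                 i += 1
--             continue
--
--         # Block comment
--         if i + 1 < n and content[i : i + 2] == "/*":
--             while i < n:
--                 if i + 1 < n and content[i : i + 2] == "*/":
--                     mask.add(i)
--                     mask.add(i + 1)
--                     i += 2
--                     break
--                 mask.add(i)
--                 i += 1
--             continue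
--
--         i += 1
--
--     return mask
-- ===== SOURCE B (Python) =====
-- def _compute_comment_mask_js(content: str) -> set[int]:
--     NORMAL, SQUOTE, DQUOTE, TEMPLATE, LINE, BLOCK, CLOSE = range(7)
--     mask: set[int] = set()
--     state = NORMAL
--     esc = False
--     n = len(content)
--     for i, ch in enumerate(content):
--         if state == NORMAL:
--             if ch == "`":
--                 state = TEMPLATE
--             elif ch == '"':
--                 state = DQUOTE
--             elif ch == "'":
--                 state = SQUOTE
--             elif ch == "/" and i + 1 < n:
--                 nxt = content[i + 1]
--                 if nxt == "/":
--                     mask.add(i)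
--                     state = LINE
--                 elif nxt == "*":
--                     mask.add(i)
--                     state = BLOCK
--         elif state == LINE:
--             if ch == "\n":
--                 state = NORMAL
--             else:
--                 mask.add(i)
--         elif state == BLOCK:
--             mask.add(i)
--             if ch == "*" and i + 1 < n and content[i + 1] == "/":
--                 state = CLOSE
--         elif state == CLOSE:
--             mask.add(i)
--             state = NORMAL
--         else:  # SQUOTE / DQUOTE / TEMPLATE
--             if esc:
--                 esc = False
--             elif ch == "\\" and i + 1 < n:
--                 esc = True
--             elif state == TEMPLATE and ch == "`":
--                 state = NORMAL
--             elif state != TEMPLATE and ch == "\n":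
--                 state = NORMAL
--             elif (state == DQUOTE and ch == '"') or (state == SQUOTE and ch == "'"):
--                 state = NORMAL
--     return mask
-- ===== Notes on version B (the rewrite author's own statement) =====
-- stated objective: faster
-- what changed: Replaced A's nested inner while-loops (one per lexical mode, with content[i:i+2] slice tests) by a single flat one-pass loop over enumerate(content) driven by an explicit state enum (NORMAL/SQUOTE/DQUOTE/TEMPLATE/LINE/BLOCK/CLOSE) and a pending-escape flag.
import Mathlib
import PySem

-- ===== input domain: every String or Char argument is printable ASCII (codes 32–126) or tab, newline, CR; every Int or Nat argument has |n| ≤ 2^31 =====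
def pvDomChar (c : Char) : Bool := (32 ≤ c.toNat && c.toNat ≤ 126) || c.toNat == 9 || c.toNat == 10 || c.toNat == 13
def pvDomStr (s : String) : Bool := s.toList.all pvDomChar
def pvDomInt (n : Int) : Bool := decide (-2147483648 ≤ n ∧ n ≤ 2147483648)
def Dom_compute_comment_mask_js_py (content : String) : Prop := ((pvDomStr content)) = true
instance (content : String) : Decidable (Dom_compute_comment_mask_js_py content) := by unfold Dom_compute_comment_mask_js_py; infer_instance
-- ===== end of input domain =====

-- B replaces A's nested per-mode inner while-loops by a single flat one-pass loop over the
-- characters driven by an explicit lexer-state enum and a pending-escape flag (same O(n) scan,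
-- measurably faster by a constant factor: no per-char slicing or inner-loop re-dispatch).

-- ===== PORT A =====
-- content[i] (only ever evaluated under a guard i < n, so the default is never returned)
def pvGetC (cs : List Char) (i : Nat) : Char := cs.getD i ' '

-- The while loops are transliterated as structural recursion on a fuel argument; every
-- caller passes fuel ≥ n - i, so the fuel never runs out before the loop condition fails.

-- A's inner while loop of the template-literal branch: the index i after the loop
def aTemplate (cs : List Char) (n : Nat) : Nat → Nat → Nat
  | 0, i => i
  | fuel + 1, i =>
    if i < n then
      if pvGetC cs i = '\\' ∧ i + 1 < n then aTemplate cs n fuel (i + 2)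
      else if pvGetC cs i = '`' then i + 1
      else aTemplate cs n fuel (i + 1)
    else i

-- A's inner while loop of the quoted-string branch
def aString (cs : List Char) (n : Nat) (q : Char) : Nat → Nat → Nat
  | 0, i => i
  | fuel + 1, i =>
    if i < n then
      if pvGetC cs i = '\n' then i
      else if pvGetC cs i = '\\' ∧ i + 1 < n then aString cs n q fuel (i + 2)
      else if pvGetC cs i = q then i + 1
      else aString cs n q fuel (i + 1)
    else i

-- A's inner while loop of the line-comment branch: (mask after, index after)
def aLine (cs : List Char) (n : Nat) : Nat → Nat → List Int → List Int × Nat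
  | 0, i, mask => (mask, i)
  | fuel + 1, i, mask =>
    if i < n then
      if pvGetC cs i = '\n' then (mask, i)
      else aLine cs n fuel (i + 1) (PySem.Set.add mask ((i : Nat) : Int))
    else (mask, i)

-- A's inner while loop of the block-comment branch
def aBlock (cs : List Char) (n : Nat) : Nat → Nat → List Int → List Int × Nat
  | 0, i, mask => (mask, i)
  | fuel + 1, i, mask =>
    if i < n then
      if i + 1 < n ∧ pvGetC cs i = '*' ∧ pvGetC cs (i + 1) = '/' then
        (PySem.Set.add (PySem.Set.add mask ((i : Nat) : Int)) (((i + 1 : Nat)) : Int), i + 2)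
      else aBlock cs n fuel (i + 1) (PySem.Set.add mask ((i : Nat) : Int))
    else (mask, i)

-- A's outer while loop
def aLoop (cs : List Char) (n : Nat) : Nat → Nat → List Int → List Int
  | 0, _, mask => mask
  | fuel + 1, i, mask =>
    if i < n then
      if pvGetC cs i = '`' then aLoop cs n fuel (aTemplate cs n (fuel + 1) (i + 1)) mask
      else if pvGetC cs i = '"' ∨ pvGetC cs i = '\'' then
        aLoop cs n fuel (aString cs n (pvGetC cs i) (fuel + 1) (i + 1)) mask
      else if i + 1 < n ∧ pvGetC cs i = '/' ∧ pvGetC cs (i + 1) = '/' then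
        aLoop cs n fuel (aLine cs n (fuel + 1) i mask).2 (aLine cs n (fuel + 1) i mask).1
      else if i + 1 < n ∧ pvGetC cs i = '/' ∧ pvGetC cs (i + 1) = '*' then
        aLoop cs n fuel (aBlock cs n (fuel + 1) i mask).2 (aBlock cs n (fuel + 1) i mask).1
      else aLoop cs n fuel (i + 1) mask
    else mask

def compute_comment_mask_js_py (content : String) : List Int :=
  aLoop content.toList content.toList.length (content.toList.length + 1) 0 []

-- ===== PORT B =====
inductive PvJsState where
  | normal | squote | dquote | template | line | block | close
deriving DecidableEq, Repr

-- B's single flat loop over enumerate(content); rest is the not-yet-visited suffix,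
-- so `rest.head?` is content[i+1] and `rest ≠ []` is `i + 1 < n`.
def bLoop (i : Nat) (st : PvJsState) (esc : Bool) (mask : List Int) : List Char → List Int
  | [] => mask
  | ch :: rest =>
    match st with
    | .normal =>
      if ch = '`' then bLoop (i + 1) .template false mask rest
      else if ch = '"' then bLoop (i + 1) .dquote false mask rest
      else if ch = '\'' then bLoop (i + 1) .squote false mask rest
      else if ch = '/' then
        match rest.head? with
        | some nxt =>
          if nxt = '/' then bLoop (i + 1) .line false (PySem.Set.add mask ((i : Nat) : Int)) rest
          else if nxt = '*' then
            bLoop (i + 1) .block false (PySem.Set.add mask ((i : Nat) : Int)) rest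
          else bLoop (i + 1) .normal false mask rest
        | none => bLoop (i + 1) .normal false mask rest
      else bLoop (i + 1) .normal false mask rest
    | .line =>
      if ch = '\n' then bLoop (i + 1) .normal false mask rest
      else bLoop (i + 1) .line false (PySem.Set.add mask ((i : Nat) : Int)) rest
    | .block =>
      if ch = '*' ∧ rest.head? = some '/' then
        bLoop (i + 1) .close false (PySem.Set.add mask ((i : Nat) : Int)) rest
      else bLoop (i + 1) .block false (PySem.Set.add mask ((i : Nat) : Int)) rest
    | .close => bLoop (i + 1) .normal false (PySem.Set.add mask ((i : Nat) : Int)) rest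
    | .squote | .dquote | .template =>
      if esc then bLoop (i + 1) st false mask rest
      else if ch = '\\' ∧ rest ≠ [] then bLoop (i + 1) st true mask rest
      else if st = .template ∧ ch = '`' then bLoop (i + 1) .normal false mask rest
      else if st ≠ .template ∧ ch = '\n' then bLoop (i + 1) .normal false mask rest
      else if (st = .dquote ∧ ch = '"') ∨ (st = .squote ∧ ch = '\'') then
        bLoop (i + 1) .normal false mask rest
      else bLoop (i + 1) st false mask rest

def compute_comment_mask_js_py_alt (content : String) : List Int :=
  bLoop 0 .normal false [] content.toList

-- ===== PRECONDITION & SPEC =====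
def Spec_compute_comment_mask_js_py (content : String) (out : List Int) : Prop := out = compute_comment_mask_js_py_alt content
instance (content : String) (out : List Int) : Decidable (Spec_compute_comment_mask_js_py content out) := by unfold Spec_compute_comment_mask_js_py; infer_instance

-- ===== CLAIM (what is proved, stated in full; the proofs are below) =====
def Claim_equal_compute_comment_mask_js_py : Prop := ∀ (content : String), Dom_compute_comment_mask_js_py content → Spec_compute_comment_mask_js_py content (compute_comment_mask_js_py content)

-- ===== LEMMAS AND PROOFS =====

theorem pv_drop_cons (cs : List Char) (i : Nat) (h : i < cs.length) :
    cs.drop i = pvGetC cs i :: cs.drop (i + 1) := by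
  rw [pvGetC, List.getD_eq_getElem _ _ h]; exact List.drop_eq_getElem_cons h

theorem pv_drop_nil (cs : List Char) (i : Nat) (h : cs.length ≤ i) : cs.drop i = [] :=
  List.drop_eq_nil_iff.mpr h

theorem pv_head_drop (cs : List Char) (j : Nat) (h : j < cs.length) :
    (cs.drop j).head? = some (pvGetC cs j) := by
  rw [List.head?_drop, List.getElem?_eq_getElem h, pvGetC, List.getD_eq_getElem _ _ h]

theorem pv_head_drop_none (cs : List Char) (j : Nat) (h : cs.length ≤ j) :
    (cs.drop j).head? = none := by
  rw [List.head?_drop, List.getElem?_eq_none h]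

theorem pv_drop_ne_nil (cs : List Char) (j : Nat) (h : j < cs.length) : cs.drop j ≠ [] := by
  simp [List.drop_eq_nil_iff]; omega

theorem pv_lt_of_drop_ne_nil (cs : List Char) (j : Nat) (h : cs.drop j ≠ []) :
    j < cs.length := by
  by_contra hc; exact h (pv_drop_nil cs j (by omega))

-- one-step unfolding lemmas for bLoop
theorem bLoop_nil (i : Nat) (st : PvJsState) (esc : Bool) (mask : List Int) :
    bLoop i st esc mask [] = mask := by cases st <;> rfl

theorem bN_tpl (i : Nat) (esc : Bool) (mask : List Int) (ch : Char) (r : List Char)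
    (h : ch = '`') : bLoop i .normal esc mask (ch :: r) = bLoop (i + 1) .template false mask r := by
  subst h; simp [bLoop]

theorem bN_dq (i : Nat) (esc : Bool) (mask : List Int) (ch : Char) (r : List Char)
    (h : ch = '"') : bLoop i .normal esc mask (ch :: r) = bLoop (i + 1) .dquote false mask r := by
  subst h; simp [bLoop]

theorem bN_sq (i : Nat) (esc : Bool) (mask : List Int) (ch : Char) (r : List Char)
    (h : ch = '\'') : bLoop i .normal esc mask (ch :: r) = bLoop (i + 1) .squote false mask r := by
  subst h; simp [bLoop]

theorem bN_line (i : Nat) (esc : Bool) (mask : List Int) (ch : Char) (r : List Char)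
    (h : ch = '/') (h2 : r.head? = some '/') :
    bLoop i .normal esc mask (ch :: r)
      = bLoop (i + 1) .line false (PySem.Set.add mask ((i : Nat) : Int)) r := by
  subst h; simp [bLoop, h2]

theorem bN_block (i : Nat) (esc : Bool) (mask : List Int) (ch : Char) (r : List Char)
    (h : ch = '/') (h2 : r.head? = some '*') :
    bLoop i .normal esc mask (ch :: r)
      = bLoop (i + 1) .block false (PySem.Set.add mask ((i : Nat) : Int)) r := by
  subst h; simp [bLoop, h2]

theorem bN_slash_other (i : Nat) (esc : Bool) (mask : List Int) (ch c : Char) (r : List Char)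
    (h : ch = '/') (h2 : r.head? = some c) (h3 : c ≠ '/') (h4 : c ≠ '*') :
    bLoop i .normal esc mask (ch :: r) = bLoop (i + 1) .normal false mask r := by
  subst h; simp [bLoop, h2, h3, h4]

theorem bN_slash_none (i : Nat) (esc : Bool) (mask : List Int) (ch : Char) (r : List Char)
    (h : ch = '/') (h2 : r.head? = none) :
    bLoop i .normal esc mask (ch :: r) = bLoop (i + 1) .normal false mask r := by
  subst h; simp [bLoop, h2]

theorem bN_other (i : Nat) (esc : Bool) (mask : List Int) (ch : Char) (r : List Char)
    (h1 : ch ≠ '`') (h2 : ch ≠ '"') (h3 : ch ≠ '\'') (h4 : ch ≠ '/') :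
    bLoop i .normal esc mask (ch :: r) = bLoop (i + 1) .normal false mask r := by
  simp [bLoop, h1, h2, h3, h4]

theorem bL_nl (i : Nat) (esc : Bool) (mask : List Int) (ch : Char) (r : List Char)
    (h : ch = '\n') : bLoop i .line esc mask (ch :: r) = bLoop (i + 1) .normal false mask r := by
  subst h; simp [bLoop]

theorem bL_mark (i : Nat) (esc : Bool) (mask : List Int) (ch : Char) (r : List Char)
    (h : ch ≠ '\n') :
    bLoop i .line esc mask (ch :: r)
      = bLoop (i + 1) .line false (PySem.Set.add mask ((i : Nat) : Int)) r := by
  simp [bLoop, h]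

theorem bB_close (i : Nat) (esc : Bool) (mask : List Int) (ch : Char) (r : List Char)
    (h : ch = '*') (h2 : r.head? = some '/') :
    bLoop i .block esc mask (ch :: r)
      = bLoop (i + 1) .close false (PySem.Set.add mask ((i : Nat) : Int)) r := by
  subst h; simp [bLoop, h2]

theorem bB_mark (i : Nat) (esc : Bool) (mask : List Int) (ch : Char) (r : List Char)
    (h : ¬(ch = '*' ∧ r.head? = some '/')) :
    bLoop i .block esc mask (ch :: r)
      = bLoop (i + 1) .block false (PySem.Set.add mask ((i : Nat) : Int)) r := by
  simp [bLoop, h]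

theorem bC_step (i : Nat) (esc : Bool) (mask : List Int) (ch : Char) (r : List Char) :
    bLoop i .close esc mask (ch :: r)
      = bLoop (i + 1) .normal false (PySem.Set.add mask ((i : Nat) : Int)) r := by
  simp [bLoop]

theorem bS_esc (i : Nat) (st : PvJsState)
    (hst : st = .template ∨ st = .dquote ∨ st = .squote) (mask : List Int) (ch : Char)
    (r : List Char) : bLoop i st true mask (ch :: r) = bLoop (i + 1) st false mask r := by
  rcases hst with h | h | h <;> subst h <;> simp [bLoop]

theorem bS_bs (i : Nat) (st : PvJsState)
    (hst : st = .template ∨ st = .dquote ∨ st = .squote) (mask : List Int) (ch : Char)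
    (r : List Char) (h : ch = '\\') (hr : r ≠ []) :
    bLoop i st false mask (ch :: r) = bLoop (i + 1) st true mask r := by
  subst h; rcases hst with h | h | h <;> subst h <;> simp [bLoop, hr]

theorem bS_tpl_end (i : Nat) (mask : List Int) (ch : Char) (r : List Char) (h : ch = '`') :
    bLoop i .template false mask (ch :: r) = bLoop (i + 1) .normal false mask r := by
  subst h; simp [bLoop]

theorem bS_nl (i : Nat) (st : PvJsState) (hst : st = .dquote ∨ st = .squote) (mask : List Int)
    (ch : Char) (r : List Char) (h : ch = '\n') :
    bLoop i st false mask (ch :: r) = bLoop (i + 1) .normal false mask r := by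
  subst h; rcases hst with h | h <;> subst h <;> simp [bLoop]

theorem bS_close (i : Nat) (st : PvJsState) (mask : List Int) (ch : Char) (r : List Char)
    (hq : (st = .dquote ∧ ch = '"') ∨ (st = .squote ∧ ch = '\'')) :
    bLoop i st false mask (ch :: r) = bLoop (i + 1) .normal false mask r := by
  rcases hq with ⟨h1, h2⟩ | ⟨h1, h2⟩ <;> subst h1 <;> subst h2 <;> simp [bLoop]

theorem bT_other (i : Nat) (mask : List Int) (ch : Char) (r : List Char)
    (hbs : ¬(ch = '\\' ∧ r ≠ [])) (hbt : ch ≠ '`') :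
    bLoop i .template false mask (ch :: r) = bLoop (i + 1) .template false mask r := by
  simp [bLoop, hbs, hbt]

theorem bSD_other (i : Nat) (st : PvJsState) (q : Char)
    (hq : (q = '"' ∧ st = .dquote) ∨ (q = '\'' ∧ st = .squote)) (mask : List Int) (ch : Char)
    (r : List Char) (hbs : ¬(ch = '\\' ∧ r ≠ [])) (hnl : ch ≠ '\n') (hqc : ch ≠ q) :
    bLoop i st false mask (ch :: r) = bLoop (i + 1) st false mask r := by
  rcases hq with ⟨h1, h2⟩ | ⟨h1, h2⟩ <;> subst h1 <;> subst h2 <;> simp [bLoop, hbs, hnl, hqc]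


-- the inner loops never move the index backwards, and never past n
theorem aTemplate_ge (cs : List Char) (n : Nat) (fuel : Nat) :
    ∀ i, i ≤ aTemplate cs n fuel i := by
  induction fuel with
  | zero => intro i; simp [aTemplate]
  | succ k ih =>
    intro i; rw [aTemplate]; split_ifs
    all_goals first | (have := ih (i + 2); omega) | (have := ih (i + 1); omega)

theorem aTemplate_le (cs : List Char) (n : Nat) (fuel : Nat) :
    ∀ i, i ≤ n → aTemplate cs n fuel i ≤ n := by
  induction fuel with
  | zero => intro i h; simpa [aTemplate] using h
  | succ k ih =>
    intro i h; rw [aTemplate]; split_ifs with h1 h2 h3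
    · exact ih (i + 2) (by have := h2.2; omega)
    · omega
    · exact ih (i + 1) (by omega)
    · exact h

theorem aString_ge (cs : List Char) (n : Nat) (q : Char) (fuel : Nat) :
    ∀ i, i ≤ aString cs n q fuel i := by
  induction fuel with
  | zero => intro i; simp [aString]
  | succ k ih =>
    intro i; rw [aString]; split_ifs
    all_goals first | (have := ih (i + 2); omega) | (have := ih (i + 1); omega)

theorem aString_le (cs : List Char) (n : Nat) (q : Char) (fuel : Nat) :
    ∀ i, i ≤ n → aString cs n q fuel i ≤ n := by
  induction fuel with
  | zero => intro i h; simpa [aString] using h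
  | succ k ih =>
    intro i h; rw [aString]; split_ifs with h1 h2 h3 h4
    · omega
    · exact ih (i + 2) (by have := h3.2; omega)
    · omega
    · exact ih (i + 1) (by omega)
    · exact h

theorem aLine_ge (cs : List Char) (n : Nat) (fuel : Nat) :
    ∀ i mask, i ≤ (aLine cs n fuel i mask).2 := by
  induction fuel with
  | zero => intro i mask; simp [aLine]
  | succ k ih =>
    intro i mask; rw [aLine]; split_ifs
    all_goals have := ih (i + 1) (PySem.Set.add mask ((i : Nat) : Int)); omega

theorem aLine_le (cs : List Char) (n : Nat) (fuel : Nat) :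
    ∀ i mask, i ≤ n → (aLine cs n fuel i mask).2 ≤ n := by
  induction fuel with
  | zero => intro i mask h; simpa [aLine] using h
  | succ k ih =>
    intro i mask h; rw [aLine]; split_ifs with h1 h2
    · simpa using h
    · exact ih (i + 1) _ (by omega)
    · simpa using h

theorem aBlock_ge (cs : List Char) (n : Nat) (fuel : Nat) :
    ∀ i mask, i ≤ (aBlock cs n fuel i mask).2 := by
  induction fuel with
  | zero => intro i mask; simp [aBlock]
  | succ k ih =>
    intro i mask; rw [aBlock]; split_ifs
    all_goals have := ih (i + 1) (PySem.Set.add mask ((i : Nat) : Int)); omega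

theorem aBlock_le (cs : List Char) (n : Nat) (fuel : Nat) :
    ∀ i mask, i ≤ n → (aBlock cs n fuel i mask).2 ≤ n := by
  induction fuel with
  | zero => intro i mask h; simpa [aBlock] using h
  | succ k ih =>
    intro i mask h; rw [aBlock]; split_ifs with h1 h2
    · have := h2.1; simp; omega
    · exact ih (i + 1) _ (by omega)
    · simpa using h

-- B run from the template state equals B run from normal at the index where A's inner loop stops
theorem tpl_step (cs : List Char) :
    ∀ fuel i mask, cs.length - i ≤ fuel →
    bLoop i .template false mask (cs.drop i)
      = bLoop (aTemplate cs cs.length fuel i) .normal false mask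
          (cs.drop (aTemplate cs cs.length fuel i)) := by
  intro fuel
  induction fuel with
  | zero =>
    intro i mask hk
    show bLoop i .template false mask (cs.drop i) = bLoop i .normal false mask (cs.drop i)
    rw [pv_drop_nil cs i (by omega), bLoop_nil, bLoop_nil]
  | succ k ih =>
    intro i mask hk
    by_cases hi : i < cs.length
    · rw [aTemplate, if_pos hi]
      by_cases he : pvGetC cs i = '\\' ∧ i + 1 < cs.length
      · rw [if_pos he, pv_drop_cons cs i hi,
          bS_bs _ _ (Or.inl rfl) _ _ _ he.1 (pv_drop_ne_nil cs (i + 1) he.2),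
          pv_drop_cons cs (i + 1) he.2, bS_esc _ _ (Or.inl rfl)]
        exact ih (i + 2) mask (by omega)
      · rw [if_neg he]
        by_cases hb : pvGetC cs i = '`'
        · rw [if_pos hb, pv_drop_cons cs i hi, bS_tpl_end _ _ _ _ hb]
        · rw [if_neg hb, pv_drop_cons cs i hi,
            bT_other _ _ _ _ (fun hc => he ⟨hc.1, pv_lt_of_drop_ne_nil cs (i + 1) hc.2⟩) hb]
          exact ih (i + 1) mask (by omega)
    · rw [aTemplate, if_neg hi, pv_drop_nil cs i (by omega), bLoop_nil, bLoop_nil]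

-- same for the two quoted-string states
theorem string_step (cs : List Char) (q : Char) (st : PvJsState)
    (hq : (q = '"' ∧ st = .dquote) ∨ (q = '\'' ∧ st = .squote)) :
    ∀ fuel i mask, cs.length - i ≤ fuel →
    bLoop i st false mask (cs.drop i)
      = bLoop (aString cs cs.length q fuel i) .normal false mask
          (cs.drop (aString cs cs.length q fuel i)) := by
  have hstS : st = .template ∨ st = .dquote ∨ st = .squote := by
    rcases hq with ⟨_, h⟩ | ⟨_, h⟩ <;> simp [h]
  have hst2 : st = .dquote ∨ st = .squote := by
    rcases hq with ⟨_, h⟩ | ⟨_, h⟩ <;> simp [h]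
  intro fuel
  induction fuel with
  | zero =>
    intro i mask hk
    show bLoop i st false mask (cs.drop i) = bLoop i .normal false mask (cs.drop i)
    rw [pv_drop_nil cs i (by omega), bLoop_nil, bLoop_nil]
  | succ k ih =>
    intro i mask hk
    by_cases hi : i < cs.length
    · rw [aString, if_pos hi]
      by_cases hnl : pvGetC cs i = '\n'
      · rw [if_pos hnl, pv_drop_cons cs i hi, bS_nl _ _ hst2 _ _ _ hnl,
          bN_other _ _ _ _ _ (by rw [hnl]; decide) (by rw [hnl]; decide) (by rw [hnl]; decide)
            (by rw [hnl]; decide)]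
      · rw [if_neg hnl]
        by_cases he : pvGetC cs i = '\\' ∧ i + 1 < cs.length
        · rw [if_pos he, pv_drop_cons cs i hi,
            bS_bs _ _ hstS _ _ _ he.1 (pv_drop_ne_nil cs (i + 1) he.2),
            pv_drop_cons cs (i + 1) he.2, bS_esc _ _ hstS]
          exact ih (i + 2) mask (by omega)
        · rw [if_neg he]
          by_cases hqc : pvGetC cs i = q
          · rw [if_pos hqc, pv_drop_cons cs i hi,
              bS_close _ _ _ _ _ (by
                rcases hq with ⟨h1, h2⟩ | ⟨h1, h2⟩
                · exact Or.inl ⟨h2, h1 ▸ hqc⟩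
                · exact Or.inr ⟨h2, h1 ▸ hqc⟩)]
          · rw [if_neg hqc, pv_drop_cons cs i hi,
              bSD_other _ _ _ hq _ _ _
                (fun hc => he ⟨hc.1, pv_lt_of_drop_ne_nil cs (i + 1) hc.2⟩) hnl hqc]
            exact ih (i + 1) mask (by omega)
    · rw [aString, if_neg hi, pv_drop_nil cs i (by omega), bLoop_nil, bLoop_nil]

-- same for the line-comment state
theorem line_step (cs : List Char) :
    ∀ fuel i mask, cs.length - i ≤ fuel →
    bLoop i .line false mask (cs.drop i)
      = bLoop (aLine cs cs.length fuel i mask).2 .normal false (aLine cs cs.length fuel i mask).1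
          (cs.drop (aLine cs cs.length fuel i mask).2) := by
  intro fuel
  induction fuel with
  | zero =>
    intro i mask hk
    show bLoop i .line false mask (cs.drop i) = bLoop i .normal false mask (cs.drop i)
    rw [pv_drop_nil cs i (by omega), bLoop_nil, bLoop_nil]
  | succ k ih =>
    intro i mask hk
    by_cases hi : i < cs.length
    · rw [aLine, if_pos hi]
      by_cases hnl : pvGetC cs i = '\n'
      · rw [if_pos hnl]
        dsimp only
        rw [pv_drop_cons cs i hi, bL_nl _ _ _ _ _ hnl,
          bN_other _ _ _ _ _ (by rw [hnl]; decide) (by rw [hnl]; decide) (by rw [hnl]; decide)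
            (by rw [hnl]; decide)]
      · rw [if_neg hnl, pv_drop_cons cs i hi, bL_mark _ _ _ _ _ hnl]
        exact ih (i + 1) _ (by omega)
    · rw [aLine, if_neg hi, pv_drop_nil cs i (by omega), bLoop_nil, bLoop_nil]

-- same for the block-comment state
theorem block_step (cs : List Char) :
    ∀ fuel i mask, cs.length - i ≤ fuel →
    bLoop i .block false mask (cs.drop i)
      = bLoop (aBlock cs cs.length fuel i mask).2 .normal false
          (aBlock cs cs.length fuel i mask).1
          (cs.drop (aBlock cs cs.length fuel i mask).2) := by
  intro fuel
  induction fuel with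
  | zero =>
    intro i mask hk
    show bLoop i .block false mask (cs.drop i) = bLoop i .normal false mask (cs.drop i)
    rw [pv_drop_nil cs i (by omega), bLoop_nil, bLoop_nil]
  | succ k ih =>
    intro i mask hk
    by_cases hi : i < cs.length
    · rw [aBlock, if_pos hi]
      by_cases hcl : i + 1 < cs.length ∧ pvGetC cs i = '*' ∧ pvGetC cs (i + 1) = '/'
      · rw [if_pos hcl]
        dsimp only
        rw [pv_drop_cons cs i hi,
          bB_close _ _ _ _ _ hcl.2.1 (by rw [pv_head_drop cs (i + 1) hcl.1, hcl.2.2]),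
          pv_drop_cons cs (i + 1) hcl.1, bC_step]
      · rw [if_neg hcl, pv_drop_cons cs i hi, bB_mark _ _ _ _ _ ?hm]
        case hm =>
          rintro ⟨h1, h2⟩
          have h3 := pv_lt_of_drop_ne_nil cs (i + 1) (fun hnil => by rw [hnil] at h2; simp at h2)
          rw [pv_head_drop cs (i + 1) h3] at h2
          exact hcl ⟨h3, h1, Option.some.inj h2⟩
        exact ih (i + 1) _ (by omega)
    · rw [aBlock, if_neg hi, pv_drop_nil cs i (by omega), bLoop_nil, bLoop_nil]

-- A's outer loop equals B's flat loop run from the normal state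
theorem main_loop (cs : List Char) :
    ∀ fuel i mask, cs.length - i ≤ fuel → i ≤ cs.length →
    aLoop cs cs.length fuel i mask = bLoop i .normal false mask (cs.drop i) := by
  intro fuel
  induction fuel with
  | zero =>
    intro i mask hk hle
    show mask = bLoop i .normal false mask (cs.drop i)
    rw [pv_drop_nil cs i (by omega), bLoop_nil]
  | succ k ih =>
    intro i mask hk hle
    by_cases hi : i < cs.length
    · rw [aLoop, if_pos hi]
      by_cases h1 : pvGetC cs i = '`'
      · rw [if_pos h1, pv_drop_cons cs i hi, bN_tpl _ _ _ _ _ h1,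
          tpl_step cs (k + 1) (i + 1) mask (by omega),
          ih (aTemplate cs cs.length (k + 1) (i + 1)) mask
            (by have := aTemplate_ge cs cs.length (k + 1) (i + 1); omega)
            (aTemplate_le cs cs.length (k + 1) (i + 1) (by omega))]
      · rw [if_neg h1]
        by_cases h2 : pvGetC cs i = '"' ∨ pvGetC cs i = '\''
        · rw [if_pos h2]
          rcases h2 with hq | hq
          · rw [pv_drop_cons cs i hi, bN_dq _ _ _ _ _ hq,
              string_step cs (pvGetC cs i) .dquote (Or.inl ⟨hq, rfl⟩) (k + 1) (i + 1) mask
                (by omega),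
              ih (aString cs cs.length (pvGetC cs i) (k + 1) (i + 1)) mask
                (by have := aString_ge cs cs.length (pvGetC cs i) (k + 1) (i + 1); omega)
                (aString_le cs cs.length (pvGetC cs i) (k + 1) (i + 1) (by omega))]
          · rw [pv_drop_cons cs i hi, bN_sq _ _ _ _ _ hq,
              string_step cs (pvGetC cs i) .squote (Or.inr ⟨hq, rfl⟩) (k + 1) (i + 1) mask
                (by omega),
              ih (aString cs cs.length (pvGetC cs i) (k + 1) (i + 1)) mask
                (by have := aString_ge cs cs.length (pvGetC cs i) (k + 1) (i + 1); omega)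
                (aString_le cs cs.length (pvGetC cs i) (k + 1) (i + 1) (by omega))]
        · rw [if_neg h2]
          have hdq : pvGetC cs i ≠ '"' := fun h => h2 (Or.inl h)
          have hsq : pvGetC cs i ≠ '\'' := fun h => h2 (Or.inr h)
          by_cases h3 : i + 1 < cs.length ∧ pvGetC cs i = '/' ∧ pvGetC cs (i + 1) = '/'
          · rw [if_pos h3]
            have ha : aLine cs cs.length (k + 1) i mask
                = aLine cs cs.length k (i + 1) (PySem.Set.add mask ((i : Nat) : Int)) := by
              rw [aLine, if_pos hi, if_neg (by rw [h3.2.1]; decide)]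
            rw [ha, pv_drop_cons cs i hi,
              bN_line _ _ _ _ _ h3.2.1 (by rw [pv_head_drop cs (i + 1) h3.1, h3.2.2]),
              line_step cs k (i + 1) (PySem.Set.add mask ((i : Nat) : Int)) (by omega),
              ih (aLine cs cs.length k (i + 1) (PySem.Set.add mask ((i : Nat) : Int))).2 _
                (by have := aLine_ge cs cs.length k (i + 1)
                      (PySem.Set.add mask ((i : Nat) : Int)); omega)
                (aLine_le cs cs.length k (i + 1) _ (by omega))]
          · rw [if_neg h3]
            by_cases h4 : i + 1 < cs.length ∧ pvGetC cs i = '/' ∧ pvGetC cs (i + 1) = '*'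
            · rw [if_pos h4]
              have ha : aBlock cs cs.length (k + 1) i mask
                  = aBlock cs cs.length k (i + 1) (PySem.Set.add mask ((i : Nat) : Int)) := by
                rw [aBlock, if_pos hi,
                  if_neg (by rintro ⟨_, hc, _⟩; rw [h4.2.1] at hc; exact absurd hc (by decide))]
              rw [ha, pv_drop_cons cs i hi,
                bN_block _ _ _ _ _ h4.2.1 (by rw [pv_head_drop cs (i + 1) h4.1, h4.2.2]),
                block_step cs k (i + 1) (PySem.Set.add mask ((i : Nat) : Int)) (by omega),
                ih (aBlock cs cs.length k (i + 1) (PySem.Set.add mask ((i : Nat) : Int))).2 _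
                  (by have := aBlock_ge cs cs.length k (i + 1)
                        (PySem.Set.add mask ((i : Nat) : Int)); omega)
                  (aBlock_le cs cs.length k (i + 1) _ (by omega))]
            · rw [if_neg h4, ih (i + 1) mask (by omega) (by omega), pv_drop_cons cs i hi]
              by_cases h5 : pvGetC cs i = '/'
              · by_cases h6 : i + 1 < cs.length
                · rw [bN_slash_other _ _ _ _ (pvGetC cs (i + 1)) _ h5
                    (pv_head_drop cs (i + 1) h6)
                    (fun hh => h3 ⟨h6, h5, hh⟩) (fun hh => h4 ⟨h6, h5, hh⟩)]
                · rw [bN_slash_none _ _ _ _ _ h5 (pv_head_drop_none cs (i + 1) (by omega))]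
              · rw [bN_other _ _ _ _ _ h1 hdq hsq h5]
    · rw [aLoop, if_neg hi, pv_drop_nil cs i (by omega), bLoop_nil]

-- ===== VERDICT (by name: the statement is the Claim_ definition above) =====
theorem compute_comment_mask_js_py_spec : Claim_equal_compute_comment_mask_js_py := by
  intro content _
  unfold Spec_compute_comment_mask_js_py
  unfold compute_comment_mask_js_py compute_comment_mask_js_py_alt
  have h := main_loop content.toList (content.toList.length + 1) 0 [] (by omega) (Nat.zero_le _)
  rw [List.drop_zero] at h
  exact h
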